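-- pv_equiv track=rewrite | github.com/gcpreston/aoc-2018 | aoc/day02/day02.py | part1
-- ===== SOURCE A (Python) =====
-- def part1(boxes):
--     two_count = 0
--     three_count = 0
--
--     for b in boxes:
--         letters = counts(b)
--         if 2 in letters.values():
--             two_count += 1
--         if 3 in letters.values():
--             three_count += 1
--     return two_count * three_count
--
-- def counts(s):
--     letters = dict()
--     for c in s:
--         if c in letters:
--             letters[c] += 1
--         else:
--             letters[c] = 1
--     return letters
-- ===== SOURCE B (Python) =====
-- def part1(boxes):
--     two_count = 0
--     three_count = 0
--     for b in boxes:
--         lens = run_lengths(sorted(b))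
--         if 2 in lens:
--             two_count += 1
--         if 3 in lens:
--             three_count += 1
--     return two_count * three_count
--
-- def run_lengths(chars):
--     # run lengths of adjacent equal elements (chars is sorted, so runs = letter multiplicities)
--     if not chars:
--         return []
--     head, rest = chars[0], chars[1:]
--     k = 0
--     while k < len(rest) and rest[k] == head:
--         k += 1
--     return [1 + k] + run_lengths(rest[k:])
-- ===== Notes on version B (the rewrite author's own statement) =====
-- stated objective: alternative
-- what changed: Replaces the dict-based letter counting with sort-then-run-length-scan: each box is sorted and adjacent equal letters are grouped, the run lengths playing the role of the count multiset; no dict is built.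
import Mathlib
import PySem

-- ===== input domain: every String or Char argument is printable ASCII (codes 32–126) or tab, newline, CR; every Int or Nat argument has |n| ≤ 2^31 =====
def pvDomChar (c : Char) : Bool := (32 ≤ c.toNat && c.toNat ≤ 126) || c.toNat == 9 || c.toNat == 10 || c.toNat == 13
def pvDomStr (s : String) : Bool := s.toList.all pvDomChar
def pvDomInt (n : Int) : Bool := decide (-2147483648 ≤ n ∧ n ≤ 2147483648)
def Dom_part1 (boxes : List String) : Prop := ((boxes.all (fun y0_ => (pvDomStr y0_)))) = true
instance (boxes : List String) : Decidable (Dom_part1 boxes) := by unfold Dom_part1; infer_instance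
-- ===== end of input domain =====

-- B replaces the dict-based letter counting with sort-then-run-length-scan over each box (alternative algorithm, similar cost).


-- ===== PORT A =====
-- helper `counts`: dict of letter -> multiplicity, built exactly as A's loop does
def counts (s : String) : PySem.Dict Char Int :=
  s.toList.foldl
    (fun letters c =>
      if letters.contains c then letters.insert c (letters.getD c 0 + 1)
      else letters.insert c 1)
    PySem.Dict.empty

def part1 (boxes : List String) : Int :=
  let r := boxes.foldl
    (fun (st : Int × Int) b =>
      let letters := counts b
      let st := if (2 : Int) ∈ letters.values then (st.1 + 1, st.2) else st
      let st := if (3 : Int) ∈ letters.values then (st.1, st.2 + 1) else st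
      st)
    (0, 0)
  r.1 * r.2

-- ===== PORT B =====
-- helper `run_lengths`: lengths of maximal runs of adjacent equal characters
def runLengths : List Char → List Int
  | [] => []
  | c :: rest =>
    let k := (rest.takeWhile (· == c)).length
    (1 + (k : Int)) :: runLengths (rest.drop k)
  termination_by l => l.length
  decreasing_by simp

def part1_alt (boxes : List String) : Int :=
  let r := boxes.foldl
    (fun (st : Int × Int) b =>
      let lens := runLengths (PySem.List.sorted b.toList (fun x => x) false)
      let st := if (2 : Int) ∈ lens then (st.1 + 1, st.2) else st
      let st := if (3 : Int) ∈ lens then (st.1, st.2 + 1) else st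
      st)
    (0, 0)
  r.1 * r.2

-- ===== PRECONDITION & SPEC =====
def Spec_part1 (boxes : List String) (out : Int) : Prop := out = part1_alt boxes
instance (boxes : List String) (out : Int) : Decidable (Spec_part1 boxes out) := by unfold Spec_part1; infer_instance

-- ===== CLAIM (what is proved, stated in full; the proofs are below) =====
def Claim_equal_part1 : Prop := ∀ (boxes : List String), Dom_part1 boxes → Spec_part1 boxes (part1 boxes)

-- ===== LEMMAS AND PROOFS =====

-- A's hand-rolled counting dict is Counter(s)
theorem counts_eq_counter (s : String) : counts s = PySem.Dict.counter s.toList := by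
  have hf : (fun (letters : PySem.Dict Char Int) c =>
      if letters.contains c then letters.insert c (letters.getD c 0 + 1)
      else letters.insert c 1)
      = fun (letters : PySem.Dict Char Int) c => letters.insert c (letters.getD c 0 + 1) := by
    funext d c
    by_cases h : d.contains c
    · simp [h]
    · have h0 : d.getD c 0 = 0 := by
        have := (PySem.Dict.get?_eq_none_iff_contains (d := d) (k := c)).mpr (by simpa using h)
        simp [PySem.Dict.getD, this]
      simp [h, h0]
  unfold counts
  rw [hf, PySem.Dict.foldl_insert_getD_add_one_eq_counter]

theorem counter_values_mem (s : List Char) (n : Int) :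
    n ∈ (PySem.Dict.counter s).values ↔ ∃ c ∈ s, (s.count c : Int) = n := by
  simp only [PySem.Dict.values, PySem.Dict.items_counter, List.map_map, List.mem_map,
    Function.comp]
  constructor
  · rintro ⟨c, hc, h⟩
    exact ⟨c, (PySem.Set.mem_ofList _ _).mp hc, h⟩
  · rintro ⟨c, hc, h⟩
    exact ⟨c, (PySem.Set.mem_ofList _ _).mpr hc, h⟩

-- run lengths of a sorted list are exactly the letter multiplicities
theorem runs_mem (l : List Char) (hs : l.Pairwise (· ≤ ·)) (n : Int) :
    n ∈ runLengths l ↔ ∃ c ∈ l, (l.count c : Int) = n := by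
  match l with
  | [] => rw [runLengths]; simp
  | c :: rest =>
    have hrestp : rest.Pairwise (· ≤ ·) := (List.pairwise_cons.mp hs).2
    have hle : ∀ x ∈ rest, c ≤ x := (List.pairwise_cons.mp hs).1
    set k := (rest.takeWhile (· == c)).length with hk
    have hdrop : rest.drop k = rest.dropWhile (· == c) := by
      conv_lhs => rw [← List.takeWhile_append_dropWhile (p := (· == c)) (l := rest)]
      rw [hk, List.drop_left]
    have hsplit : rest = rest.takeWhile (· == c) ++ rest.drop k := by
      rw [hdrop, List.takeWhile_append_dropWhile]
    have htake : ∀ x ∈ rest.takeWhile (· == c), x = c := by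
      intro x hx
      have := List.mem_takeWhile_imp hx
      simpa using this
    have hrest'p : (rest.drop k).Pairwise (· ≤ ·) :=
      hrestp.sublist (List.drop_sublist k rest)
    have hnoc : c ∉ rest.drop k := by
      rw [hdrop]
      intro hmem
      cases hrw : rest.dropWhile (· == c) with
      | nil => rw [hrw] at hmem; simp at hmem
      | cons h t =>
        have hhne : ¬ (h == c) = true := by
          have := List.head_dropWhile_not (p := (· == c)) (l := rest)
            (by rw [hrw]; simp)
          simpa [hrw] using this
        have hne : h ≠ c := by simpa using hhne
        rw [hrw] at hmem
        rcases List.mem_cons.mp hmem with h1 | h2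
        · exact hne h1.symm
        · -- c after h in sorted suffix: h ≤ c and c ≤ h
          have hsub : (h :: t).Pairwise (· ≤ ·) := by rw [← hrw]; exact hs.sublist ((List.dropWhile_sublist _).cons _)
          have h1 : h ≤ c := (List.pairwise_cons.mp hsub).1 c h2
          have h2' : c ≤ h := hle h (by rw [hsplit, hdrop, hrw]; simp)
          exact hne (le_antisymm h1 h2')
    have hcountc : (c :: rest).count c = 1 + k := by
      conv_lhs => rw [hsplit]
      rw [← List.cons_append, List.count_append]
      have h1 : (c :: rest.takeWhile (· == c)).count c = 1 + k := by
        have : ∀ x ∈ rest.takeWhile (· == c), c = x := fun x hx => (htake x hx).symm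
        rw [List.count_cons_self, hk, List.count_eq_length.mpr this]
        omega
      have h2 : (rest.drop k).count c = 0 := List.count_eq_zero.mpr hnoc
      omega
    have hcountd : ∀ d ∈ rest.drop k, (c :: rest).count d = (rest.drop k).count d := by
      intro d hd
      have hdne : d ≠ c := fun h => hnoc (h ▸ hd)
      conv_lhs => rw [hsplit]
      rw [← List.cons_append, List.count_append]
      have : (c :: rest.takeWhile (· == c)).count d = 0 := by
        refine List.count_eq_zero.mpr ?_
        intro hmem
        rcases List.mem_cons.mp hmem with h1 | h1
        · exact hdne h1
        · exact hdne (htake d h1)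
      omega
    have ih := runs_mem (rest.drop k) hrest'p n
    have hrl : runLengths (c :: rest) = (1 + (k : Int)) :: runLengths (rest.drop k) := by
      conv_lhs => rw [runLengths]
    rw [hrl]
    constructor
    · intro hmem
      rcases List.mem_cons.mp hmem with h1 | h1
      · exact ⟨c, List.mem_cons_self, by rw [hcountc]; push_cast; omega⟩
      · obtain ⟨d, hd, hcnt⟩ := ih.mp h1
        refine ⟨d, ?_, by rw [hcountd d hd]; exact hcnt⟩
        rw [hsplit]; exact List.mem_cons_of_mem _ (List.mem_append_right _ hd)
    · rintro ⟨d, hd, hcnt⟩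
      rcases List.mem_cons.mp hd with h1 | h1
      · subst h1
        rw [hcountc] at hcnt
        exact List.mem_cons.mpr (Or.inl (by push_cast at hcnt ⊢; omega))
      · rw [hsplit] at hd
        rcases List.mem_cons.mp hd with h1' | h1'
        · subst h1'
          rw [hcountc] at hcnt
          exact List.mem_cons.mpr (Or.inl (by push_cast at hcnt ⊢; omega))
        · rcases List.mem_append.mp h1' with h2 | h2
          · have : d = c := htake d h2
            subst this
            rw [hcountc] at hcnt
            exact List.mem_cons.mpr (Or.inl (by push_cast at hcnt ⊢; omega))
          · exact List.mem_cons.mpr (Or.inr (ih.mpr ⟨d, h2, by rw [← hcountd d h2]; exact hcnt⟩))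
  termination_by l.length
  decreasing_by simp

-- per-box: "n is a dict value" = "n is a run length of the sorted box"
theorem box_flag (b : String) (n : Int) :
    ((n ∈ (counts b).values) ↔ (n ∈ runLengths (PySem.List.sorted b.toList (fun x => x) false))) := by
  rw [counts_eq_counter, counter_values_mem]
  have hperm : (PySem.List.sorted b.toList (fun x => x) false).Perm b.toList :=
    PySem.List.sorted_perm _ _ _
  rw [runs_mem _ (by simpa using PySem.List.sorted_pairwise b.toList (fun x => x))]
  constructor
  · rintro ⟨c, hc, h⟩
    exact ⟨c, hperm.mem_iff.mpr hc, by rw [hperm.count_eq]; exact h⟩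
  · rintro ⟨c, hc, h⟩
    exact ⟨c, hperm.mem_iff.mp hc, by rw [← hperm.count_eq]; exact h⟩

-- ===== VERDICT (by name: the statement is the Claim_ definition above) =====
theorem part1_spec : Claim_equal_part1 := by
  intro boxes _
  unfold Spec_part1 part1 part1_alt
  have : (fun (st : Int × Int) b =>
      let letters := counts b
      let st := if (2 : Int) ∈ letters.values then (st.1 + 1, st.2) else st
      let st := if (3 : Int) ∈ letters.values then (st.1, st.2 + 1) else st
      st)
      = (fun (st : Int × Int) b =>
      let lens := runLengths (PySem.List.sorted b.toList (fun x => x) false)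
      let st := if (2 : Int) ∈ lens then (st.1 + 1, st.2) else st
      let st := if (3 : Int) ∈ lens then (st.1, st.2 + 1) else st
      st) := by
    funext st b
    simp only [box_flag]
  rw [this]
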